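-- pv_equiv track=rewrite | github.com/KaungCS/DubsTech-Datathon-26 | scripts/web_scraper.py | infer_domain_category
-- ===== SOURCE A (Python) =====
-- def infer_domain_category(hostname: str) -> str:
--     host = hostname.lower()
--     if ".edu" in host or host.endswith(".edu"):
--         return "Educational Platforms"
--     if ".gov" in host or host.endswith(".gov"):
--         return "Government and Public Services"
--     if any(token in host for token in ["bbc", "news", "journal", "press", "times", "mirror", "media", "post", "cnn", "reuters", "ap"]):
--         return "News and Media"
--     if any(token in host for token in ["shop", "store", "ecommerce", "market", "cart"]):
--         return "E-commerce"
--     if any(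
--         token in host
--         for token in ["video", "stream", "tv", "movie", "music", "youtube", "vimeo", "twitch", "netflix", "hulu", "spotify"]
--     ):
--         return "Streaming Platforms"
--     if any(
--         token in host
--         for token in ["health", "clinic", "hospital", "med", "wellness", "care"]
--     ):
--         return "Health and Wellness"
--     if any(
--         token in host
--         for token in ["tech", "science", "research", "lab", "ai", "data", "software", "developer"]
--     ):
--         return "Technology Science and Research"
--     return "Technology Science and Research"
-- ===== SOURCE B (Python) =====
-- # B: instead of testing each token against the host per category, scan the host's
-- # character positions once and look each bounded-length window up in a single
-- # token -> priority hash map, keeping the minimum priority seen.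
--
-- _CATEGORIES = [
--     "Educational Platforms",
--     "Government and Public Services",
--     "News and Media",
--     "E-commerce",
--     "Streaming Platforms",
--     "Health and Wellness",
--     "Technology Science and Research",
-- ]
--
-- # every token, mapped to the priority (index) of its category; token lengths are 2..9
-- _TOKMAP = {
--     ".edu": 0,
--     ".gov": 1,
--     "bbc": 2, "news": 2, "journal": 2, "press": 2, "times": 2, "mirror": 2,
--     "media": 2, "post": 2, "cnn": 2, "reuters": 2, "ap": 2,
--     "shop": 3, "store": 3, "ecommerce": 3, "market": 3, "cart": 3,
--     "video": 4, "stream": 4, "tv": 4, "movie": 4, "music": 4, "youtube": 4,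
--     "vimeo": 4, "twitch": 4, "netflix": 4, "hulu": 4, "spotify": 4,
--     "health": 5, "clinic": 5, "hospital": 5, "med": 5, "wellness": 5, "care": 5,
--     "tech": 6, "science": 6, "research": 6, "lab": 6, "ai": 6, "data": 6,
--     "software": 6, "developer": 6,
-- }
--
--
-- def infer_domain_category(hostname: str) -> str:
--     host = hostname.lower()
--     n = len(host)
--     best = len(_CATEGORIES)
--     for i in range(n):
--         for length in range(2, 10):
--             p = _TOKMAP.get(host[i:i + length])
--             if p is not None and p < best:
--                 best = p
--     return _CATEGORIES[best] if best < len(_CATEGORIES) else "Technology Science and Research"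
-- ===== Notes on version B (the rewrite author's own statement) =====
-- stated objective: alternative
-- what changed: Replaces the per-category token-in-host branch chain by a single scan over the host's character positions that looks each length-2..9 window up in one token-to-priority hash map and keeps the minimum priority seen (the redundant endswith checks are subsumed by the substring test).
import Mathlib
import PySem

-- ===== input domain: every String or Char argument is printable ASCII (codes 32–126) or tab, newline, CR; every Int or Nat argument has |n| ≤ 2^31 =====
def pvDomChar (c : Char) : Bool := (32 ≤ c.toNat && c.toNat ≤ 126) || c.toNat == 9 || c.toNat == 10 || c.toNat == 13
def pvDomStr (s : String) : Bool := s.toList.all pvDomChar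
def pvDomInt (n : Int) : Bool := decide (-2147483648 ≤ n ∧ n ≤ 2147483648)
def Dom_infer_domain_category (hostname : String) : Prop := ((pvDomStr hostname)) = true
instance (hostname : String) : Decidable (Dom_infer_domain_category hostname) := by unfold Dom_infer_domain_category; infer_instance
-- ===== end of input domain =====

-- B replaces A's per-category branch chain of substring tests by a single scan of the
-- host's positions, looking each length-2..9 window up in one token→priority map and
-- keeping the minimum priority; objective: alternative (same result, different algorithm).

-- ===== PORT A =====
def infer_domain_category (hostname : String) : String :=
  let host := PySem.Str.lower hostname
  if PySem.Str.isIn ".edu" host || PySem.Str.endswith host ".edu" then "Educational Platforms"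
  else if PySem.Str.isIn ".gov" host || PySem.Str.endswith host ".gov" then "Government and Public Services"
  else if ["bbc", "news", "journal", "press", "times", "mirror", "media", "post", "cnn", "reuters", "ap"].any (fun t => PySem.Str.isIn t host) then "News and Media"
  else if ["shop", "store", "ecommerce", "market", "cart"].any (fun t => PySem.Str.isIn t host) then "E-commerce"
  else if ["video", "stream", "tv", "movie", "music", "youtube", "vimeo", "twitch", "netflix", "hulu", "spotify"].any (fun t => PySem.Str.isIn t host) then "Streaming Platforms"
  else if ["health", "clinic", "hospital", "med", "wellness", "care"].any (fun t => PySem.Str.isIn t host) then "Health and Wellness"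
  else if ["tech", "science", "research", "lab", "ai", "data", "software", "developer"].any (fun t => PySem.Str.isIn t host) then "Technology Science and Research"
  else "Technology Science and Research"

-- ===== PORT B =====
def pvCats : List String :=
  ["Educational Platforms",
   "Government and Public Services",
   "News and Media",
   "E-commerce",
   "Streaming Platforms",
   "Health and Wellness",
   "Technology Science and Research"]

-- token → priority map (_TOKMAP); keys as List Char since the Str primitives work on code points
def pvTokMap : PySem.Dict (List Char) Nat :=
  PySem.Dict.mk
    [(".edu".toList, 0),
     (".gov".toList, 1),
     ("bbc".toList, 2), ("news".toList, 2), ("journal".toList, 2), ("press".toList, 2),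
     ("times".toList, 2), ("mirror".toList, 2), ("media".toList, 2), ("post".toList, 2),
     ("cnn".toList, 2), ("reuters".toList, 2), ("ap".toList, 2),
     ("shop".toList, 3), ("store".toList, 3), ("ecommerce".toList, 3), ("market".toList, 3), ("cart".toList, 3),
     ("video".toList, 4), ("stream".toList, 4), ("tv".toList, 4), ("movie".toList, 4),
     ("music".toList, 4), ("youtube".toList, 4), ("vimeo".toList, 4), ("twitch".toList, 4),
     ("netflix".toList, 4), ("hulu".toList, 4), ("spotify".toList, 4),
     ("health".toList, 5), ("clinic".toList, 5), ("hospital".toList, 5), ("med".toList, 5),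
     ("wellness".toList, 5), ("care".toList, 5),
     ("tech".toList, 6), ("science".toList, 6), ("research".toList, 6), ("lab".toList, 6),
     ("ai".toList, 6), ("data".toList, 6), ("software".toList, 6), ("developer".toList, 6)]

def infer_domain_category_alt (hostname : String) : String :=
  let host := PySem.Chars.lower hostname.toList
  let n : Int := host.length
  let best :=
    (PySem.List.pyRange 0 n 1).foldl
      (fun best i =>
        (PySem.List.pyRange 2 10 1).foldl
          (fun best L =>
            match PySem.Dict.get? pvTokMap (PySem.List.slice host (some i) (some (i + L))) with
            | some p => if p < best then p else best
            | none => best)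
          best)
      pvCats.length
  if best < pvCats.length then pvCats.getD best "Technology Science and Research"
  else "Technology Science and Research"

-- ===== PRECONDITION & SPEC =====
def Spec_infer_domain_category (hostname : String) (out : String) : Prop := out = infer_domain_category_alt hostname
instance (hostname : String) (out : String) : Decidable (Spec_infer_domain_category hostname out) := by unfold Spec_infer_domain_category; infer_instance

-- ===== CLAIM (what is proved, stated in full; the proofs are below) =====
def Claim_equal_infer_domain_category : Prop := ∀ (hostname : String), Dom_infer_domain_category hostname → Spec_infer_domain_category hostname (infer_domain_category hostname)

-- ===== LEMMAS AND PROOFS =====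

-- A's 'sub in host or host.endswith(sub)' collapses to the substring test alone.
theorem pv_endswith_subsumed (host sub : String) :
    (PySem.Str.isIn sub host || PySem.Str.endswith host sub) = PySem.Str.isIn sub host := by
  have himp : PySem.Str.endswith host sub = true → PySem.Str.isIn sub host = true := by
    intro he
    simp only [PySem.Str.isIn, PySem.Str.endswith] at he ⊢
    exact (PySem.Chars.isIn_iff_infix _ _).mpr ((PySem.Chars.endswith_iff _ _).mp he).isInfix
  cases he : PySem.Str.endswith host sub with
  | false => rw [Bool.or_false]
  | true => rw [himp he]; rfl

-- the token lists of A's categories, indexed by priority (proof-side view of pvTokMap)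
def pvGroups : List (List (List Char)) :=
  [[".edu".toList],
   [".gov".toList],
   ["bbc".toList, "news".toList, "journal".toList, "press".toList, "times".toList,
    "mirror".toList, "media".toList, "post".toList, "cnn".toList, "reuters".toList, "ap".toList],
   ["shop".toList, "store".toList, "ecommerce".toList, "market".toList, "cart".toList],
   ["video".toList, "stream".toList, "tv".toList, "movie".toList, "music".toList,
    "youtube".toList, "vimeo".toList, "twitch".toList, "netflix".toList, "hulu".toList, "spotify".toList],
   ["health".toList, "clinic".toList, "hospital".toList, "med".toList, "wellness".toList, "care".toList],
   ["tech".toList, "science".toList, "research".toList, "lab".toList, "ai".toList,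
    "data".toList, "software".toList, "developer".toList]]

-- the boolean A's branch p tests (after the endswith collapse)
def pvCond (s : List Char) (p : Nat) : Bool :=
  (pvGroups.getD p []).any (fun t => PySem.Chars.isIn t s)

-- the inner fold of B, generic in the lookup function
def pvFMin {α : Type} (f : α → Option Nat) (xs : List α) (acc : Nat) : Nat :=
  xs.foldl (fun b x => match f x with | some p => if p < b then p else b | none => b) acc

def pvLookup (s : List Char) (i L : Int) : Option Nat :=
  PySem.Dict.get? pvTokMap (PySem.List.slice s (some i) (some (i + L)))

def pvScanFold (s : List Char) (acc : Nat) : Nat :=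
  (PySem.List.pyRange 0 (s.length : Int) 1).foldl
    (fun b i => pvFMin (pvLookup s i) (PySem.List.pyRange 2 10 1) b) acc

-- a (position, length) pair whose window looks up to priority p
def pvHit (s : List Char) (p : Nat) : Prop :=
  ∃ i L : Int, i ∈ PySem.List.pyRange 0 (s.length : Int) 1 ∧ L ∈ PySem.List.pyRange 2 10 1 ∧
    pvLookup s i L = some p

theorem pvFMin_le_acc {α : Type} (f : α → Option Nat) (xs : List α) (acc : Nat) :
    pvFMin f xs acc ≤ acc := by
  induction xs generalizing acc with
  | nil => simp [pvFMin]
  | cons x xs ih =>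
      have step : (match f x with | some p => if p < acc then p else acc | none => acc) ≤ acc := by
        cases f x with
        | none => exact le_rfl
        | some p => dsimp only; split <;> omega
      calc pvFMin f (x :: xs) acc
          = pvFMin f xs (match f x with | some p => if p < acc then p else acc | none => acc) := rfl
        _ ≤ _ := le_trans (ih _) step

theorem pvFMin_le_hit {α : Type} (f : α → Option Nat) (xs : List α) (x : α) (p : Nat)
    (hp : f x = some p) : ∀ acc, x ∈ xs → pvFMin f xs acc ≤ p := by
  induction xs with
  | nil => intro acc hx; cases hx
  | cons y ys ih =>
      intro acc hx
      rcases List.mem_cons.mp hx with rfl | hmem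
      · have : (match f x with | some q => if q < acc then q else acc | none => acc) ≤ p := by
          rw [hp]; dsimp only; split <;> omega
        exact le_trans (pvFMin_le_acc f ys _) this
      · exact ih _ hmem

theorem pvFMin_cases {α : Type} (f : α → Option Nat) (xs : List α) (acc : Nat) :
    pvFMin f xs acc = acc ∨ ∃ x ∈ xs, f x = some (pvFMin f xs acc) := by
  induction xs generalizing acc with
  | nil => exact Or.inl rfl
  | cons x xs ih =>
      have hstep : pvFMin f (x :: xs) acc
          = pvFMin f xs (match f x with | some p => if p < acc then p else acc | none => acc) := rfl
      rcases ih (match f x with | some p => if p < acc then p else acc | none => acc) with h | ⟨y, hy, hfy⟩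
      · rw [hstep, h]
        cases hfx : f x with
        | none => exact Or.inl rfl
        | some p =>
            by_cases hlt : p < acc
            · exact Or.inr ⟨x, List.mem_cons_self, by rw [hfx]; simp [hlt]⟩
            · left; simp [hlt]
      · exact Or.inr ⟨y, List.mem_cons_of_mem _ hy, by rw [hstep]; exact hfy⟩

theorem pvOuterFold_le_acc (s : List Char) (xs : List Int) (acc : Nat) :
    xs.foldl (fun b i => pvFMin (pvLookup s i) (PySem.List.pyRange 2 10 1) b) acc ≤ acc := by
  induction xs generalizing acc with
  | nil => simp
  | cons i is ih => exact le_trans (ih _) (pvFMin_le_acc _ _ _)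

theorem pvScanFold_le_acc (s : List Char) (acc : Nat) : pvScanFold s acc ≤ acc :=
  pvOuterFold_le_acc s _ acc

theorem pvOuterFold_le_hit (s : List Char) (xs : List Int) (i L : Int) (p : Nat)
    (hL : L ∈ PySem.List.pyRange 2 10 1) (hlook : pvLookup s i L = some p) :
    ∀ acc, i ∈ xs →
      xs.foldl (fun b i => pvFMin (pvLookup s i) (PySem.List.pyRange 2 10 1) b) acc ≤ p := by
  induction xs with
  | nil => intro acc hi; cases hi
  | cons j js ih =>
      intro acc hi
      rcases List.mem_cons.mp hi with rfl | hmem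
      · exact le_trans (pvOuterFold_le_acc s js _) (pvFMin_le_hit _ _ L p hlook acc hL)
      · exact ih _ hmem

theorem pvScanFold_le_hit (s : List Char) (acc p : Nat) (h : pvHit s p) :
    pvScanFold s acc ≤ p := by
  obtain ⟨i, L, hi, hL, hlook⟩ := h
  exact pvOuterFold_le_hit s _ i L p hL hlook acc hi

theorem pvScanFold_cases (s : List Char) (acc : Nat) :
    pvScanFold s acc = acc ∨ pvHit s (pvScanFold s acc) := by
  unfold pvScanFold pvHit
  generalize PySem.List.pyRange 0 (s.length : Int) 1 = xs
  induction xs generalizing acc with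
  | nil => exact Or.inl rfl
  | cons i is ih =>
      have hstep : (i :: is).foldl (fun b i => pvFMin (pvLookup s i) (PySem.List.pyRange 2 10 1) b) acc
          = is.foldl (fun b i => pvFMin (pvLookup s i) (PySem.List.pyRange 2 10 1) b)
              (pvFMin (pvLookup s i) (PySem.List.pyRange 2 10 1) acc) := rfl
      rw [hstep]
      rcases ih (pvFMin (pvLookup s i) (PySem.List.pyRange 2 10 1) acc) with h | ⟨j, L, hj, hL, hlook⟩
      · rw [h]
        rcases pvFMin_cases (pvLookup s i) (PySem.List.pyRange 2 10 1) acc with h2 | ⟨L, hL, hlook⟩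
        · exact Or.inl h2
        · exact Or.inr ⟨i, L, List.mem_cons_self, hL, hlook⟩
      · exact Or.inr ⟨j, L, List.mem_cons_of_mem _ hj, hL, hlook⟩

-- every map entry's key belongs to the group of its value, with length in [2, 10)
theorem pvTokMap_items_spec :
    ∀ kv ∈ pvTokMap.items, kv.1 ∈ pvGroups.getD kv.2 [] ∧ 2 ≤ kv.1.length ∧ kv.1.length < 10 := by
  decide

-- every group token looks up to its priority, with length in [2, 10)
theorem pvGroup_spec (p : Nat) (hp : p < 7) :
    ∀ t ∈ pvGroups.getD p [], PySem.Dict.get? pvTokMap t = some p ∧ 2 ≤ t.length ∧ t.length < 10 := by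
  interval_cases p <;> decide

-- a window of s is a contiguous segment, hence an infix
theorem pv_slice_infix (s : List Char) (i L : Int) (hi : 0 ≤ i) (hL : 0 ≤ L) :
    PySem.List.slice s (some i) (some (i + L)) <:+: s := by
  rw [PySem.List.slice_toNat s hi (by omega)]
  exact ((List.take_prefix _ _).isInfix).trans ((List.drop_suffix _ _).isInfix)

theorem pvHit_iff_match (s : List Char) (p : Nat) (hp : p < 7) :
    pvHit s p ↔ ∃ t ∈ pvGroups.getD p [], t <:+: s := by
  constructor
  · rintro ⟨i, L, hi, hL, hlook⟩
    rw [PySem.List.mem_pyRange_one] at hi hL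
    have hmem := PySem.Dict.mem_items_of_get?_eq_some pvTokMap hlook
    obtain ⟨hg, -, -⟩ := pvTokMap_items_spec _ hmem
    exact ⟨_, hg, pv_slice_infix s i L hi.1 (by omega)⟩
  · rintro ⟨t, ht, hinf⟩
    obtain ⟨hget, hlen2, hlen10⟩ := pvGroup_spec p hp t ht
    obtain ⟨pre, suf, hsplit⟩ := hinf
    have hsplit' : pre ++ (t ++ suf) = s := by rw [← List.append_assoc]; exact hsplit
    have hlen : pre.length + (t.length + suf.length) = s.length := by
      rw [← hsplit']; simp
    refine ⟨(pre.length : Int), (t.length : Int), ?_, ?_, ?_⟩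
    · rw [PySem.List.mem_pyRange_one]
      refine ⟨by exact_mod_cast Nat.zero_le _, ?_⟩
      exact_mod_cast (by omega : pre.length < s.length)
    · rw [PySem.List.mem_pyRange_one]
      exact ⟨by exact_mod_cast hlen2, by exact_mod_cast hlen10⟩
    · unfold pvLookup
      rw [PySem.List.slice_natCast_add]
      have hdrop : s.drop pre.length = t ++ suf := by
        rw [← hsplit']; exact List.drop_left
      rw [hdrop, List.take_left]
      exact hget

theorem pvCond_iff_match (s : List Char) (p : Nat) :
    pvCond s p = true ↔ ∃ t ∈ pvGroups.getD p [], t <:+: s := by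
  unfold pvCond
  rw [List.any_eq_true]
  constructor
  · rintro ⟨t, ht, hin⟩
    exact ⟨t, ht, (PySem.Chars.isIn_iff_infix _ _).mp hin⟩
  · rintro ⟨t, ht, hinf⟩
    exact ⟨t, ht, (PySem.Chars.isIn_iff_infix _ _).mpr hinf⟩

theorem pvHit_iff_cond (s : List Char) (p : Nat) (hp : p < 7) :
    pvHit s p ↔ pvCond s p = true := by
  rw [pvHit_iff_match s p hp, pvCond_iff_match]

-- B's scan computes the first priority whose condition holds (7 when none does)
theorem pvScanFold_eq_first (s : List Char) :
    pvScanFold s 7 =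
      (if pvCond s 0 then 0 else if pvCond s 1 then 1 else if pvCond s 2 then 2
       else if pvCond s 3 then 3 else if pvCond s 4 then 4 else if pvCond s 5 then 5
       else if pvCond s 6 then 6 else 7) := by
  have hle7 : pvScanFold s 7 ≤ 7 := pvScanFold_le_acc s 7
  have hub : ∀ p : Nat, p < 7 → pvCond s p = true → pvScanFold s 7 ≤ p := fun p hp hc =>
    pvScanFold_le_hit s 7 p ((pvHit_iff_cond s p hp).mpr hc)
  have hself : pvScanFold s 7 < 7 → pvCond s (pvScanFold s 7) = true := by
    intro hlt
    rcases pvScanFold_cases s 7 with h | h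
    · omega
    · exact (pvHit_iff_cond s _ hlt).mp h
  split_ifs with h0 h1 h2 h3 h4 h5 h6
  · have := hub 0 (by omega) h0; omega
  · have hle := hub 1 (by omega) h1
    have : pvScanFold s 7 ≠ 0 := fun h => by rw [h] at hself; simp [hself (by omega)] at h0
    omega
  · have hle := hub 2 (by omega) h2
    have hne : ∀ q, q < 2 → pvScanFold s 7 ≠ q := by
      intro q hq he
      have hc := hself (by omega); rw [he] at hc
      interval_cases q <;> simp_all
    have := hne 0 (by omega); have := hne 1 (by omega); omega
  · have hle := hub 3 (by omega) h3
    have hne : ∀ q, q < 3 → pvScanFold s 7 ≠ q := by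
      intro q hq he
      have hc := hself (by omega); rw [he] at hc
      interval_cases q <;> simp_all
    have := hne 0 (by omega); have := hne 1 (by omega); have := hne 2 (by omega); omega
  · have hle := hub 4 (by omega) h4
    have hne : ∀ q, q < 4 → pvScanFold s 7 ≠ q := by
      intro q hq he
      have hc := hself (by omega); rw [he] at hc
      interval_cases q <;> simp_all
    have := hne 0 (by omega); have := hne 1 (by omega); have := hne 2 (by omega)
    have := hne 3 (by omega); omega
  · have hle := hub 5 (by omega) h5
    have hne : ∀ q, q < 5 → pvScanFold s 7 ≠ q := by
      intro q hq he
      have hc := hself (by omega); rw [he] at hc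
      interval_cases q <;> simp_all
    have := hne 0 (by omega); have := hne 1 (by omega); have := hne 2 (by omega)
    have := hne 3 (by omega); have := hne 4 (by omega); omega
  · have hle := hub 6 (by omega) h6
    have hne : ∀ q, q < 6 → pvScanFold s 7 ≠ q := by
      intro q hq he
      have hc := hself (by omega); rw [he] at hc
      interval_cases q <;> simp_all
    have := hne 0 (by omega); have := hne 1 (by omega); have := hne 2 (by omega)
    have := hne 3 (by omega); have := hne 4 (by omega); have := hne 5 (by omega); omega
  · have hne : ∀ q, q < 7 → pvScanFold s 7 ≠ q := by
      intro q hq he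
      have hc := hself (by omega); rw [he] at hc
      interval_cases q <;> simp_all
    have := hne 0 (by omega); have := hne 1 (by omega); have := hne 2 (by omega)
    have := hne 3 (by omega); have := hne 4 (by omega); have := hne 5 (by omega)
    have := hne 6 (by omega); omega

-- A's branch conditions are exactly pvCond on the lowered character list
theorem pvA_eq_chain (hostname : String) :
    infer_domain_category hostname =
      (let s := PySem.Chars.lower hostname.toList
       if pvCond s 0 then "Educational Platforms"
       else if pvCond s 1 then "Government and Public Services"
       else if pvCond s 2 then "News and Media"
       else if pvCond s 3 then "E-commerce"
       else if pvCond s 4 then "Streaming Platforms"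
       else if pvCond s 5 then "Health and Wellness"
       else if pvCond s 6 then "Technology Science and Research"
       else "Technology Science and Research") := by
  unfold infer_domain_category
  simp only [pv_endswith_subsumed]
  simp [pvCond, pvGroups]

-- ===== VERDICT (by name: the statement is the Claim_ definition above) =====
theorem infer_domain_category_spec : Claim_equal_infer_domain_category := by
  intro hostname _
  unfold Spec_infer_domain_category infer_domain_category_alt
  rw [pvA_eq_chain]
  dsimp only
  have hscan :
      (PySem.List.pyRange 0 ((PySem.Chars.lower hostname.toList).length : Int) 1).foldl
        (fun best i =>
          (PySem.List.pyRange 2 10 1).foldl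
            (fun best L =>
              match PySem.Dict.get? pvTokMap
                  (PySem.List.slice (PySem.Chars.lower hostname.toList) (some i) (some (i + L))) with
              | some p => if p < best then p else best
              | none => best)
            best)
        pvCats.length = pvScanFold (PySem.Chars.lower hostname.toList) 7 := rfl
  rw [hscan, pvScanFold_eq_first]
  split_ifs <;> simp_all [pvCats]
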